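-- pv_equiv track=rewrite | github.com/miliar/Code_Jam_Webscraper | solutions_python/solutions_year15_round0_nr1/3350.py | CalculateAvailability
-- ===== SOURCE A (Python) =====
-- def CalculateAvailability(PeopleAtShynessLevels):
--     newPeopleAtShynessLevels = []
--     availablePeople = 0
--     for i in range(0, len(PeopleAtShynessLevels)):
--         if availablePeople < i:
--             newPeopleAtShynessLevels.append(availablePeople)
--         else:
--             availablePeople += PeopleAtShynessLevels[i]
--             newPeopleAtShynessLevels.append(availablePeople)
--
--     return newPeopleAtShynessLevels
-- ===== SOURCE B (Python) =====
-- def CalculateAvailability(PeopleAtShynessLevels):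
--     # Staged passes: (1) build the full prefix-sum table, (2) find the cutoff
--     # index k = first i with prefix[i] < i (after which the count is frozen),
--     # (3) assemble the answer as a slice plus a constant-filled tail.
--     n = len(PeopleAtShynessLevels)
--     prefix = [0]
--     s = 0
--     for x in PeopleAtShynessLevels:
--         s += x
--         prefix.append(s)
--     k = n
--     for i in range(n):
--         if prefix[i] < i:
--             k = i
--             break
--     return prefix[1:k + 1] + [prefix[k]] * (n - k)
-- ===== Notes on version B (the rewrite author's own statement) =====
-- stated objective: alternative
-- what changed: B replaces A's single accumulator loop by three staged passes: build the full prefix-sum table, search it for the first index i with prefix[i] < i (where the count freezes), then assemble the result as a slice of the table plus a constant-filled tail.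
import Mathlib
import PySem

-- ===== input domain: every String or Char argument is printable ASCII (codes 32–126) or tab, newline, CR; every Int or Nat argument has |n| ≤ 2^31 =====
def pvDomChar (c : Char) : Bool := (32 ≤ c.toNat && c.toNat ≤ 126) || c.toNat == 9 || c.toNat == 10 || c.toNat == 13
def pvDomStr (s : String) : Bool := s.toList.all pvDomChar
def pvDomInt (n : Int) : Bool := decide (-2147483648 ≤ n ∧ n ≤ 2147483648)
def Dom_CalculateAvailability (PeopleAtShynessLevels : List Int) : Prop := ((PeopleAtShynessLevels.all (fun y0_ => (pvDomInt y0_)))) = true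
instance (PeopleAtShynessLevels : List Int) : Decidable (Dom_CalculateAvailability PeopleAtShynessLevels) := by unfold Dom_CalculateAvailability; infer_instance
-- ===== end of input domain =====

-- B replaces A's single accumulator loop by three staged passes (prefix-sum table,
-- cutoff search, slice + constant tail); same O(n) cost, different decomposition.

-- ===== PORT A =====
-- literal port of A: index loop over range(0, len(xs)), state = (output list, availablePeople)
def CalculateAvailability (PeopleAtShynessLevels : List Int) : List Int :=
  ((PySem.List.pyRange 0 (PeopleAtShynessLevels.length) 1).foldl
    (fun (st : List Int × Int) i =>
      if st.2 < i then (st.1 ++ [st.2], st.2)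
      else
        let a := st.2 + PySem.List.pyGetD PeopleAtShynessLevels i 0
        (st.1 ++ [a], a))
    ([], 0)).1

-- ===== PORT B =====
-- port of B: pass 1 builds the prefix-sum table (state = table, running sum),
-- pass 2 finds the first index i with prefix[i] < i (break = find?, default n),
-- pass 3 returns prefix[1:k+1] + [prefix[k]] * (n-k)
def CalculateAvailability_alt (PeopleAtShynessLevels : List Int) : List Int :=
  let n : Int := PeopleAtShynessLevels.length
  let pfx : List Int :=
    (PeopleAtShynessLevels.foldl
      (fun (st : List Int × Int) x => (st.1 ++ [st.2 + x], st.2 + x)) ([0], 0)).1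
  let k : Int :=
    ((PySem.List.pyRange 0 n 1).find?
      (fun i => decide (PySem.List.pyGetD pfx i 0 < i))).getD n
  PySem.List.slice pfx (some 1) (some (k + 1)) ++
    List.replicate (n - k).toNat (PySem.List.pyGetD pfx k 0)

-- ===== PRECONDITION & SPEC =====
def Spec_CalculateAvailability (PeopleAtShynessLevels : List Int) (out : List Int) : Prop := out = CalculateAvailability_alt PeopleAtShynessLevels
instance (PeopleAtShynessLevels : List Int) (out : List Int) : Decidable (Spec_CalculateAvailability PeopleAtShynessLevels out) := by unfold Spec_CalculateAvailability; infer_instance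

-- ===== CLAIM (what is proved, stated in full; the proofs are below) =====
def Claim_equal_CalculateAvailability : Prop := ∀ (PeopleAtShynessLevels : List Int), Dom_CalculateAvailability PeopleAtShynessLevels → Spec_CalculateAvailability PeopleAtShynessLevels (CalculateAvailability PeopleAtShynessLevels)

-- ===== LEMMAS AND PROOFS =====

-- recursive characterisation of A's loop body
def pvGo (i acc : Int) : List Int → List Int
  | [] => []
  | x :: rest =>
    if acc < i then acc :: pvGo (i + 1) acc rest
    else (acc + x) :: pvGo (i + 1) (acc + x) rest

-- running prefix sums starting from a (tail of B's table)
def pvT (a : Int) : List Int → List Int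
  | [] => []
  | x :: rest => (a + x) :: pvT (a + x) rest

-- number of indices accepted before the count freezes
def pvK (j a : Int) : List Int → Nat
  | [] => 0
  | x :: rest => if a < j then 0 else pvK (j + 1) (a + x) rest + 1

-- the frozen count
def pvF (j a : Int) : List Int → Int
  | [] => a
  | x :: rest => if a < j then a else pvF (j + 1) (a + x) rest

-- A's fold over the index range equals pvGo on the dropped suffix
theorem pvFoldA (xs : List Int) : ∀ (rest : List Int) (j : Nat) (out : List Int) (acc : Int),
    rest = xs.drop j →
    ((PySem.List.pyRange (j : Int) (xs.length : Int) 1).foldl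
      (fun (st : List Int × Int) i =>
        if st.2 < i then (st.1 ++ [st.2], st.2)
        else
          let a := st.2 + PySem.List.pyGetD xs i 0
          (st.1 ++ [a], a))
      (out, acc)).1 = out ++ pvGo (j : Int) acc rest := by
  intro rest
  induction rest with
  | nil =>
    intro j out acc h
    have hlen : xs.length ≤ j := by
      have := List.drop_eq_nil_iff.mp h.symm
      omega
    rw [PySem.List.pyRange_one_eq_nil (by exact_mod_cast hlen)]
    simp [pvGo]
  | cons x rest ih =>
    intro j out acc h
    have hj : j < xs.length := by
      by_contra hc
      have : xs.drop j = [] := List.drop_eq_nil_iff.mpr (by omega)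
      rw [this] at h; simp at h
    have hget : PySem.List.pyGetD xs (j : Int) 0 = x := by
      rw [PySem.List.pyGetD_eq_getElem xs 0 (Int.natCast_nonneg j) (by exact_mod_cast hj)]
      have h0 : (xs.drop j)[0]'(by rw [← h]; simp) = x := by
        simp [← h]
      rw [← h0]
      simp [List.getElem_drop]
    have hdrop : rest = xs.drop (j + 1) := by
      have : (xs.drop j).tail = rest := by rw [← h]; rfl
      rw [← this, List.tail_drop]
    rw [PySem.List.pyRange_one_cons (by exact_mod_cast hj)]
    rw [List.foldl_cons]
    by_cases hlt : acc < (j : Int)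
    · simp only [hlt, if_pos]
      have := ih (j + 1) (out ++ [acc]) acc hdrop
      push_cast at this ⊢
      rw [this]
      simp [pvGo, hlt]
    · simp only [hlt, if_neg, not_false_iff]
      have := ih (j + 1) (out ++ [acc + PySem.List.pyGetD xs (j : Int) 0])
        (acc + PySem.List.pyGetD xs (j : Int) 0) hdrop
      push_cast at this ⊢
      rw [this, hget]
      simp [pvGo, hlt]

-- B's table-building fold appends pvT
theorem pvFoldT : ∀ (xs p : List Int) (a : Int),
    (xs.foldl (fun (st : List Int × Int) x => (st.1 ++ [st.2 + x], st.2 + x)) (p, a)).1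
      = p ++ pvT a xs := by
  intro xs
  induction xs with
  | nil => intro p a; simp [pvT]
  | cons x r ih => intro p a; simpa [pvT] using ih (p ++ [a + x]) (a + x)

theorem pvT_length : ∀ (xs : List Int) (a : Int), (pvT a xs).length = xs.length := by
  intro xs; induction xs with
  | nil => intro a; rfl
  | cons x r ih => intro a; simp [pvT, ih]

theorem pvK_le : ∀ (xs : List Int) (j a : Int), pvK j a xs ≤ xs.length := by
  intro xs; induction xs with
  | nil => intro j a; simp [pvK]
  | cons x r ih =>
    intro j a
    simp only [pvK, List.length_cons]
    split_ifs
    · omega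
    · have := ih (j + 1) (a + x); omega

-- A's recursion = take-k prefix sums + frozen tail
theorem pvGo_split : ∀ (xs : List Int) (j a : Int),
    pvGo j a xs = (pvT a xs).take (pvK j a xs)
      ++ List.replicate (xs.length - pvK j a xs) (pvF j a xs) := by
  intro xs
  induction xs with
  | nil => intro j a; rfl
  | cons x r ih =>
    intro j a
    by_cases h : a < j
    · simp only [pvGo, pvT, pvK, pvF, if_pos h, List.take_zero, List.nil_append,
        Nat.sub_zero, List.length_cons, List.replicate_succ]
      congr 1
      -- tail stays frozen at a
      clear ih
      induction r generalizing j with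
      | nil => rfl
      | cons y s ih2 =>
        have h' : a < j + 1 := by omega
        simp only [pvGo, if_pos h', List.length_cons, List.replicate_succ]
        rw [ih2 (j + 1) h']
    · simp only [pvGo, pvT, pvK, pvF, if_neg h, List.take_succ_cons, List.cons_append,
        List.length_cons]
      rw [ih (j + 1) (a + x)]
      have hc : r.length + 1 - (pvK (j + 1) (a + x) r + 1) = r.length - pvK (j + 1) (a + x) r := by
        omega
      rw [hc]

-- the frozen value is the table entry at the cutoff
theorem pvF_getD : ∀ (xs : List Int) (j a : Int),
    pvF j a xs = (a :: pvT a xs).getD (pvK j a xs) 0 := by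
  intro xs
  induction xs with
  | nil => intro j a; rfl
  | cons x r ih =>
    intro j a
    by_cases h : a < j
    · simp [pvF, pvK, if_pos h]
    · simp only [pvF, pvK, if_neg h, pvT]
      rw [ih (j + 1) (a + x)]
      rfl

-- B's break-loop search over the global table computes the cutoff pvK
theorem pvFind (xs : List Int) : ∀ (rest : List Int) (j : Nat) (a : Int),
    rest = xs.drop j → j ≤ xs.length →
    (0 :: pvT 0 xs).drop j = a :: pvT a rest →
    ((PySem.List.pyRange (j : Int) (xs.length : Int) 1).find?
        (fun i => decide (PySem.List.pyGetD (0 :: pvT 0 xs) i 0 < i))).getD (xs.length : Int)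
      = ((j + pvK (j : Int) a rest : Nat) : Int) := by
  intro rest
  induction rest with
  | nil =>
    intro j a h hle _
    have : xs.length ≤ j := by
      have := List.drop_eq_nil_iff.mp h.symm; omega
    have hj : j = xs.length := by omega
    subst hj
    rw [PySem.List.pyRange_one_eq_nil (by omega)]
    simp [pvK]
  | cons x r ih =>
    intro j a h hle hP
    have hj : j < xs.length := by
      by_contra hc
      have : xs.drop j = [] := List.drop_eq_nil_iff.mpr (by omega)
      rw [this] at h; simp at h
    have hPj : PySem.List.pyGetD (0 :: pvT 0 xs) (j : Int) 0 = a := by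
      rw [PySem.List.pyGetD_eq_getElem _ 0 (Int.natCast_nonneg j)
        (by simp [pvT_length]; omega)]
      have : ((0 :: pvT 0 xs).drop j)[0]'(by rw [hP]; simp) = a := by simp [hP]
      rw [← this]; simp [List.getElem_drop]
    rw [PySem.List.pyRange_one_cons (by exact_mod_cast hj)]
    rw [List.find?_cons]
    by_cases hlt : a < (j : Int)
    · simp only [hPj, hlt, decide_true]
      simp only [Option.getD_some, pvK, if_pos hlt]
      push_cast; ring
    · simp only [hPj, hlt, decide_false]
      have hdrop : r = xs.drop (j + 1) := by
        have : (xs.drop j).tail = r := by rw [← h]; rfl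
        rw [← this, List.tail_drop]
      have hPdrop : (0 :: pvT 0 xs).drop (j + 1) = (a + x) :: pvT (a + x) r := by
        have : ((0 :: pvT 0 xs).drop j).tail = (0 :: pvT 0 xs).drop (j + 1) := by
          rw [List.tail_drop]
        rw [← this, hP, pvT]
        rfl
      have := ih (j + 1) (a + x) hdrop (by omega) hPdrop
      push_cast at this ⊢
      rw [this]
      simp only [pvK, if_neg hlt]
      push_cast; ring

-- B's search specialised to the start of the table (statement shaped like the port)
theorem pvFind0 (xs : List Int) :
    ((PySem.List.pyRange 0 (xs.length : Int) 1).find?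
        (fun i => decide (PySem.List.pyGetD ([0] ++ pvT 0 xs) i 0 < i))).getD (xs.length : Int)
      = ((pvK 0 0 xs : Nat) : Int) := by
  have h := pvFind xs xs 0 0 (by simp) (by omega) (by simp)
  simpa using h

-- ===== VERDICT (by name: the statement is the Claim_ definition above) =====
theorem CalculateAvailability_spec : Claim_equal_CalculateAvailability := by
  intro xs _
  show CalculateAvailability xs = CalculateAvailability_alt xs
  unfold CalculateAvailability CalculateAvailability_alt
  have hA := pvFoldA xs xs 0 [] 0 (by simp)
  simp only [Nat.cast_zero, List.nil_append] at hA
  rw [hA, pvFoldT xs [0] 0]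
  simp only [pvFind0 xs]
  set K := pvK 0 0 xs with hKdef
  have hKle : K ≤ xs.length := pvK_le xs 0 0
  -- slice prefix[1:k+1] = (pvT 0 xs).take K
  have hs : PySem.List.slice ([0] ++ pvT 0 xs) (some 1) (some (((K : Nat) : Int) + 1))
      = (pvT 0 xs).take K := by
    have h2 : (((K : Nat) : Int) + 1) = (((K + 1 : Nat)) : Int) := by push_cast; ring
    have h1 : (1 : Int) = ((1 : Nat) : Int) := rfl
    rw [h2, h1, PySem.List.slice_natCast]
    simp
  -- replicate count
  have hc : (((xs.length : Int)) - ((K : Nat) : Int)).toNat = xs.length - K := by omega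
  -- table entry at K
  have hg : PySem.List.pyGetD ([0] ++ pvT 0 xs) ((K : Nat) : Int) 0
      = (0 :: pvT 0 xs).getD K 0 := by
    have : ([0] ++ pvT 0 xs : List Int) = 0 :: pvT 0 xs := by simp
    rw [this]
    rw [PySem.List.pyGetD_eq_getElem _ 0 (Int.natCast_nonneg K)
      (by simp [pvT_length]; omega)]
    rw [List.getD_eq_getElem _ _ (by simp [pvT_length]; omega)]
    simp
  rw [hs, hc, hg]
  rw [pvGo_split xs 0 0, pvF_getD xs 0 0]
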